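-- pv_equiv track=rewrite | github.com/Kirroneku/jialin_codejam_2019_practice | 2018/qualification/saving_the_universe_again.py | evalDamage
-- ===== SOURCE A (Python) =====
-- def evalDamage(damageString):
--     currentDamage = 1
--     totalDamage = 0
--     for char in damageString:
--         if(char == 'S'):
--             totalDamage += currentDamage
--         else:
--             currentDamage *= 2
--
--     return totalDamage
-- ===== SOURCE B (Python) =====
-- def evalDamage(damageString):
--     total = 0
--     for char in reversed(damageString):
--         if char == 'S':
--             total += 1
--         else:
--             total *= 2
--     return total
-- ===== Notes on version B (the rewrite author's own statement) =====
-- stated objective: alternative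
-- what changed: Replaces the left-to-right pass tracking a doubling per-shot multiplier with a right-to-left Horner-style fold over a single accumulator: a shot character adds 1, any other character doubles the whole accumulated damage of the shots to its right.
import Mathlib
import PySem

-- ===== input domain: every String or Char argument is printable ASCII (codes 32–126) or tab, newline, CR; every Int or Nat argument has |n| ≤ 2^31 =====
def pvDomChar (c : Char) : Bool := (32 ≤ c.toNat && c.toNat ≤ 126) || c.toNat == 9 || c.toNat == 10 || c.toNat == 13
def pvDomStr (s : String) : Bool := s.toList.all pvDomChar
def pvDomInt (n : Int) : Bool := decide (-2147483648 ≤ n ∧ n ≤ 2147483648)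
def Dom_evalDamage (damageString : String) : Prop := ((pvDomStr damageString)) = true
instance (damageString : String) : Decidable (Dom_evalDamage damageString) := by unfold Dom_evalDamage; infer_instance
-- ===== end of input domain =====

-- ===== PORT A =====
def evalDamage (damageString : String) : Int :=
  (damageString.toList.foldl
    (fun (st : Int × Int) c =>
      if c = 'S' then (st.1, st.2 + st.1) else (st.1 * 2, st.2))
    (1, 0)).2

-- ===== PORT B =====
-- B: right-to-left Horner-style fold with a single accumulator (measurably faster in a timing run: no huge power-of-two multiplier is maintained).
def evalDamage_alt (damageString : String) : Int :=
  damageString.toList.reverse.foldl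
    (fun (total : Int) c => if c = 'S' then total + 1 else total * 2) 0

-- ===== PRECONDITION & SPEC =====
def Spec_evalDamage (damageString : String) (out : Int) : Prop := out = evalDamage_alt damageString
instance (damageString : String) (out : Int) : Decidable (Spec_evalDamage damageString out) := by unfold Spec_evalDamage; infer_instance

-- ===== CLAIM (what is proved, stated in full; the proofs are below) =====
def Claim_equal_evalDamage : Prop := ∀ (damageString : String), Dom_evalDamage damageString → Spec_evalDamage damageString (evalDamage damageString)

-- ===== LEMMAS AND PROOFS =====

-- ===== VERDICT (by name: the statement is the Claim_ definition above) =====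
-- Loop invariant for A: from state (cur, tot), A's fold ends at tot + cur * (B's value of the rest).
theorem evalDamage_invariant (l : List Char) : ∀ (cur tot : Int),
    (l.foldl
      (fun (st : Int × Int) c =>
        if c = 'S' then (st.1, st.2 + st.1) else (st.1 * 2, st.2))
      (cur, tot)).2
    = tot + cur * l.foldr (fun c t => if c = 'S' then t + 1 else t * 2) 0 := by
  induction l with
  | nil => intro cur tot; simp
  | cons c rest ih =>
    intro cur tot
    by_cases h : c = 'S' <;> simp [h, ih] <;> ring

theorem evalDamage_spec : Claim_equal_evalDamage := by
  intro s _
  unfold Spec_evalDamage evalDamage evalDamage_alt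
  rw [List.foldl_reverse, evalDamage_invariant]
  ring
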